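-- pv_equiv track=rewrite | github.com/emarberg/stable-grothendieck | tests/test_operators.py | skew_symmetric_double
-- ===== SOURCE A (Python) =====
-- def skew_symmetric_double(mu):
--     shape = {(a + 1, a + b + 1) for a in range(len(mu)) for b in range(1, mu[a] + 1)}
--     shape |= {(b, a) for (a, b) in shape}
--     a = 1
--     while True:
--         shape |= {(a, a)}
--         if (a, a + 1) not in shape:
--             break
--         a += 1
--     return shape
-- ===== SOURCE B (Python) =====
-- def skew_symmetric_double(mu):
--     shape = {(a + 1, a + b + 1) for a in range(len(mu)) for b in range(1, mu[a] + 1)}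
--     shape |= {(b, a) for (a, b) in shape}
--     c = next((i for i, x in enumerate(mu) if x < 1), len(mu))
--     shape |= {(i, i) for i in range(1, c + 2)}
--     return shape
-- ===== Notes on version B (the rewrite author's own statement) =====
-- stated objective: simpler
-- what changed: The while-True loop that repeatedly probes the growing set for (a,a+1) is replaced by a direct scan of mu (first index with entry < 1, default len(mu)) and one set-union adding the whole diagonal range(1, c+2) at once.
import Mathlib
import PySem

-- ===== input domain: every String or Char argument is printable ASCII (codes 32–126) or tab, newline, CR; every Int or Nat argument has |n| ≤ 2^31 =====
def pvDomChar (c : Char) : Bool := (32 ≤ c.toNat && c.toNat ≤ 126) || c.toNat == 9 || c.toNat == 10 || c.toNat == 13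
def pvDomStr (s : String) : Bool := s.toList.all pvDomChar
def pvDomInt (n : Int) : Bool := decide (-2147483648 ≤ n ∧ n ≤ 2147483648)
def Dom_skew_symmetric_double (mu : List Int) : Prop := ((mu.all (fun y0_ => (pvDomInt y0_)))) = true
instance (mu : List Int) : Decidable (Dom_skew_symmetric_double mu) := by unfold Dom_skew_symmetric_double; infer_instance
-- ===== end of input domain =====

-- B replaces A's while-True probe of the growing set by a direct scan of mu for the first
-- entry < 1 and one union adding the whole diagonal range; objective: simpler decomposition.

-- ===== PORT A =====
-- the `while True` loop: adds (a,a), continues while (a, a+1) is in the set.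
-- The fuel argument only makes the recursion total; mu.length + 2 is always enough
-- (proved below), so the fuel never runs out on any input.
def ssdLoopA (fuel : Nat) (shape : PySem.Set (Int × Int)) (a : Int) : PySem.Set (Int × Int) :=
  match fuel with
  | 0 => shape
  | fuel + 1 =>
    let shape := PySem.Set.add shape (a, a)          -- shape |= {(a, a)}
    if (a, a + 1) ∈ shape then ssdLoopA fuel shape (a + 1) else shape

def skew_symmetric_double (mu : List Int) : List (Int × Int) :=
  let base : PySem.Set (Int × Int) :=
    PySem.Set.ofList ((PySem.List.pyRange 0 (mu.length : Int) 1).flatMap (fun a =>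
      (PySem.List.pyRange 1 (PySem.List.pyGetD mu a 0 + 1) 1).map (fun b => (a + 1, a + b + 1))))
  let shape := PySem.Set.union base (base.map (fun p => (p.2, p.1)))   -- shape |= {(b,a) for (a,b) in shape}
  ssdLoopA (mu.length + 2) shape 1

-- ===== PORT B =====
def skew_symmetric_double_alt (mu : List Int) : List (Int × Int) :=
  let base : PySem.Set (Int × Int) :=
    PySem.Set.ofList ((PySem.List.pyRange 0 (mu.length : Int) 1).flatMap (fun a =>
      (PySem.List.pyRange 1 (PySem.List.pyGetD mu a 0 + 1) 1).map (fun b => (a + 1, a + b + 1))))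
  let shape := PySem.Set.union base (base.map (fun p => (p.2, p.1)))   -- shape |= {(b,a) for (a,b) in shape}
  -- c = next((i for i, x in enumerate(mu) if x < 1), len(mu))
  let c : Int :=
    ((((PySem.List.enumerate mu 0).find? (fun p => decide (p.2 < 1))).map (·.1)).getD (mu.length : Int))
  PySem.Set.union shape ((PySem.List.pyRange 1 (c + 2) 1).map (fun i => (i, i)))

-- ===== PRECONDITION & SPEC =====
def Spec_skew_symmetric_double (mu : List Int) (out : List (Int × Int)) : Prop := out = skew_symmetric_double_alt mu
instance (mu : List Int) (out : List (Int × Int)) : Decidable (Spec_skew_symmetric_double mu out) := by unfold Spec_skew_symmetric_double; infer_instance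

-- ===== CLAIM (what is proved, stated in full; the proofs are below) =====
def Claim_equal_skew_symmetric_double : Prop := ∀ (mu : List Int), Dom_skew_symmetric_double mu → Spec_skew_symmetric_double mu (skew_symmetric_double mu)

-- ===== LEMMAS AND PROOFS =====
-- helper abbreviations for the proofs
def pvShape0 (mu : List Int) : PySem.Set (Int × Int) :=
  let base : PySem.Set (Int × Int) :=
    PySem.Set.ofList ((PySem.List.pyRange 0 (mu.length : Int) 1).flatMap (fun a =>
      (PySem.List.pyRange 1 (PySem.List.pyGetD mu a 0 + 1) 1).map (fun b => (a + 1, a + b + 1))))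
  PySem.Set.union base (base.map (fun p => (p.2, p.1)))

def pvRun (mu : List Int) : Nat := (mu.takeWhile (fun x => decide (1 ≤ x))).length

lemma pvFindEnum (mu : List Int) : ∀ (s : Int),
    ((((PySem.List.enumerate mu s).find? (fun p => decide (p.2 < 1))).map (·.1)).getD (s + mu.length))
      = s + (pvRun mu : Int) := by
  induction mu with
  | nil => intro s; simp [PySem.List.enumerate, pvRun]
  | cons x xs ih =>
    intro s
    rw [show PySem.List.enumerate (x :: xs) s = (s, x) :: PySem.List.enumerate xs (s + 1) from rfl]
    by_cases hx : x < 1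
    · simp [List.find?, hx, pvRun, List.takeWhile, show ¬ (1 ≤ x) by omega]
    · have h1 : (1 : Int) ≤ x := by omega
      rw [List.find?]
      simp only [show (decide (((s, x) : Int × Int).2 < 1)) = false by simp [hx]]
      have hthis := ih (s + 1)
      simp only [List.length_cons, pvRun, List.takeWhile, show (decide (1 ≤ x)) = true by simp [h1]]
      simp only [pvRun] at hthis
      push_cast
      rw [show s + ((xs.length : Int) + 1) = (s + 1) + (xs.length : Int) by ring, hthis]
      ring

lemma pvRun_le (mu : List Int) : pvRun mu ≤ mu.length := by
  unfold pvRun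
  induction mu with
  | nil => simp
  | cons x xs ih =>
    by_cases h : (1:Int) ≤ x
    · simp [List.takeWhile, h]; omega
    · simp [List.takeWhile, h]

lemma pvRun_pos (mu : List Int) : ∀ i : Nat, i < pvRun mu → 1 ≤ mu.getD i 0 := by
  induction mu with
  | nil => intro i h; simp [pvRun] at h
  | cons x xs ih =>
    intro i h
    simp only [pvRun, List.takeWhile] at h
    by_cases hx : (1:Int) ≤ x
    · simp only [show (decide (1 ≤ x)) = true by simp [hx], List.length_cons] at h
      cases i with
      | zero => simpa using hx
      | succ j => exact ih j (by simpa [pvRun] using Nat.lt_of_succ_lt_succ h)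
    · simp [show (decide (1 ≤ x)) = false by simp [hx]] at h
  
lemma pvRun_stop (mu : List Int) : pvRun mu < mu.length → mu.getD (pvRun mu) 0 < 1 := by
  induction mu with
  | nil => intro h; simp [pvRun] at h
  | cons x xs ih =>
    intro h
    by_cases hx : (1:Int) ≤ x
    · simp only [pvRun, List.takeWhile, show (decide (1 ≤ x)) = true by simp [hx]] at h ⊢
      simpa [pvRun] using ih (by simpa [pvRun] using Nat.lt_of_succ_lt_succ h)
    · have h0 : pvRun (x :: xs) = 0 := by simp [pvRun, List.takeWhile, hx]
      rw [h0]
      simp only [List.getD_cons_zero]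
      omega
    
lemma pvMemSucc (mu : List Int) (x : Int) :
    ((x, x + 1) ∈ pvShape0 mu) ↔ (1 ≤ x ∧ x ≤ (mu.length : Int) ∧ 1 ≤ PySem.List.pyGetD mu (x - 1) 0) := by
  unfold pvShape0
  rw [PySem.Set.mem_union]
  constructor
  · rintro (h | h)
    · rw [PySem.Set.mem_ofList, List.mem_flatMap] at h
      obtain ⟨a, ha, hmap⟩ := h
      rw [List.mem_map] at hmap
      obtain ⟨b, hb, heq⟩ := hmap
      rw [PySem.List.mem_pyRange_one] at ha hb
      obtain ⟨h1, h2⟩ := Prod.mk.injEq .. ▸ heq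
      have hb1 : b = 1 := by omega
      subst hb1
      refine ⟨by omega, by omega, ?_⟩
      have : a = x - 1 := by omega
      subst this
      omega
    · rw [List.mem_map] at h
      obtain ⟨p, hp, heq⟩ := h
      rw [PySem.Set.mem_ofList, List.mem_flatMap] at hp
      obtain ⟨a, ha, hmap⟩ := hp
      rw [List.mem_map] at hmap
      obtain ⟨b, hb, hpe⟩ := hmap
      rw [PySem.List.mem_pyRange_one] at hb
      subst hpe
      obtain ⟨h1, h2⟩ := Prod.mk.injEq .. ▸ heq
      omega
  · rintro ⟨h1, h2, h3⟩
    left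
    rw [PySem.Set.mem_ofList, List.mem_flatMap]
    refine ⟨x - 1, ?_, ?_⟩
    · rw [PySem.List.mem_pyRange_one]; omega
    · rw [List.mem_map]
      exact ⟨1, by rw [PySem.List.mem_pyRange_one]; omega, by simp only [Prod.mk.injEq]; omega⟩

lemma pvLoopEq (mu : List Int) : ∀ (fuel : Nat) (s : PySem.Set (Int × Int)) (a : Int),
    1 ≤ a → a ≤ (pvRun mu : Int) + 1 → ((pvRun mu : Int) + 2 - a).toNat ≤ fuel →
    (∀ x : Int, ((x, x + 1) ∈ s ↔ (1 ≤ x ∧ x ≤ (mu.length : Int) ∧ 1 ≤ PySem.List.pyGetD mu (x - 1) 0))) →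
    ssdLoopA fuel s a = PySem.Set.update s ((PySem.List.pyRange a ((pvRun mu : Int) + 2) 1).map (fun i => (i, i))) := by
  intro fuel
  induction fuel with
  | zero => intro s a h1 h2 h3 _; omega
  | succ k ih =>
    intro s a h1 h2 h3 hmem
    have hrl : (pvRun mu : Int) ≤ (mu.length : Int) := by exact_mod_cast pvRun_le mu
    have hadd : ∀ x : Int, ((x, x + 1) ∈ PySem.Set.add s (a, a) ↔
        (1 ≤ x ∧ x ≤ (mu.length : Int) ∧ 1 ≤ PySem.List.pyGetD mu (x - 1) 0)) := by
      intro x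
      rw [PySem.Set.mem_add, ← hmem x]
      constructor
      · rintro (h | h)
        · exact h
        · exfalso; obtain ⟨hx, hx2⟩ := Prod.mk.injEq .. ▸ h; omega
      · exact Or.inl
    show (if (a, a + 1) ∈ PySem.Set.add s (a, a) then ssdLoopA k (PySem.Set.add s (a, a)) (a + 1)
          else PySem.Set.add s (a, a)) = _
    by_cases hac : a ≤ (pvRun mu : Int)
    · have hin : (a, a + 1) ∈ PySem.Set.add s (a, a) := by
        rw [hadd]
        refine ⟨h1, by omega, ?_⟩
        rw [PySem.List.pyGetD_of_nonneg mu 0 (by omega)]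
        have := pvRun_pos mu (a - 1).toNat (by omega)
        exact this
      rw [if_pos hin]
      rw [ih (PySem.Set.add s (a, a)) (a + 1) (by omega) (by omega) (by omega) hadd]
      rw [PySem.List.pyRange_one_cons (by omega : a < (pvRun mu : Int) + 2)]
      rw [List.map_cons, PySem.Set.update_cons]
    · have hae : a = (pvRun mu : Int) + 1 := by omega
      have hnin : (a, a + 1) ∉ PySem.Set.add s (a, a) := by
        rw [hadd]
        rintro ⟨_, hle, hge⟩
        have hlt : pvRun mu < mu.length := by omega
        have := pvRun_stop mu hlt
        rw [PySem.List.pyGetD_of_nonneg mu 0 (by omega)] at hge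
        have : mu.getD (a - 1).toNat 0 = mu.getD (pvRun mu) 0 := by
          congr 1; omega
        omega
      rw [if_neg hnin]
      rw [hae]
      rw [PySem.List.pyRange_one_cons (by omega : (pvRun mu : Int) + 1 < (pvRun mu : Int) + 2)]
      rw [PySem.List.pyRange_one_eq_nil (by omega : (pvRun mu : Int) + 2 ≤ (pvRun mu : Int) + 1 + 1)]
      rw [List.map_cons, List.map_nil, PySem.Set.update_cons]
      rfl

-- ===== VERDICT (by name: the statement is the Claim_ definition above) =====
theorem skew_symmetric_double_spec : Claim_equal_skew_symmetric_double := by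
  intro mu _hdom
  show skew_symmetric_double mu = skew_symmetric_double_alt mu
  simp only [skew_symmetric_double, skew_symmetric_double_alt]
  have hc : ((((PySem.List.enumerate mu 0).find? (fun p => decide (p.2 < 1))).map (·.1)).getD (mu.length : Int))
      = (pvRun mu : Int) := by
    have := pvFindEnum mu 0
    simpa using this
  rw [hc]
  have hrl := pvRun_le mu
  exact pvLoopEq mu (mu.length + 2) (pvShape0 mu) 1 (by omega) (by omega) (by omega)
    (fun x => pvMemSucc mu x)
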